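-- pv_equiv track=rewrite | github.com/daily-boj/x86chi | problems/P8911.py | solution
-- ===== SOURCE A (Python) =====
-- def solution(commands: str):
--     NEXT_X = (0, -1, 0, 1)
--     NEXT_Y = (1, 0, -1, 0)
--     x = y = 0
--     direction = 0
--     max_x = min_x = max_y = min_y = 0
--
--     for command in commands:
--         if command == 'F':
--             x += NEXT_X[direction]
--             y += NEXT_Y[direction]
--         elif command == 'B':
--             x -= NEXT_X[direction]
--             y -= NEXT_Y[direction]
--         elif command == 'L':
--             direction = (direction + 1) % 4
--         else:
--             direction = (direction + 3) % 4
--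
--         max_x = max(max_x, x)
--         min_x = min(min_x, x)
--
--         max_y = max(max_y, y)
--         min_y = min(min_y, y)
--
--     return (max_x - min_x) * (max_y - min_y)
-- ===== SOURCE B (Python) =====
-- def solution(commands: str):
--     # heading vector for direction d = (#L - #R so far) mod 4
--     VEC = ((0, 1), (-1, 0), (0, -1), (1, 0))
--     # pass 1: derive each command's displacement from an arithmetic turn counter
--     deltas = []
--     t = 0
--     for c in commands:
--         if c == 'L':
--             t += 1
--             deltas.append((0, 0))
--         elif c == 'F':
--             deltas.append(VEC[t % 4])
--         elif c == 'B':
--             dx, dy = VEC[t % 4]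
--             deltas.append((-dx, -dy))
--         else:
--             t -= 1
--             deltas.append((0, 0))
--     # pass 2: positions as prefix sums of the displacements
--     x = y = 0
--     xs = [0]
--     ys = [0]
--     for dx, dy in deltas:
--         x += dx
--         y += dy
--         xs.append(x)
--         ys.append(y)
--     # pass 3: bounding-box reduction
--     return (max(xs) - min(xs)) * (max(ys) - min(ys))
-- ===== Notes on version B (the rewrite author's own statement) =====
-- stated objective: alternative
-- what changed: B replaces A's fused state machine (threaded direction index plus four running extrema updated per command) by three staged passes: derive each command's displacement vector arithmetically from a signed turn counter mod 4, then build coordinate prefix-sum lists, then one max/min bounding-box reduction.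
import Mathlib
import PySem

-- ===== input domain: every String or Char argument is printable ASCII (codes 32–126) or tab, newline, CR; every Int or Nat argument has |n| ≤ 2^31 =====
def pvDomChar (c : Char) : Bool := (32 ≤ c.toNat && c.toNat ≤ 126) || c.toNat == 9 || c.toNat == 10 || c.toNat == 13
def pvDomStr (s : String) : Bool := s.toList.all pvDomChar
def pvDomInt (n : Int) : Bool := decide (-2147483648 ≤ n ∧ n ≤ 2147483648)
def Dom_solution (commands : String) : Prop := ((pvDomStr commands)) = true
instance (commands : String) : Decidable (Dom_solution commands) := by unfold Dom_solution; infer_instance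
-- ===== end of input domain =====

-- B replaces A's fused state machine (direction index threaded with four running extrema) by
-- three staged passes: per-command displacement vectors from a signed turn counter mod 4,
-- then coordinate prefix-sum lists, then one max/min bounding-box reduction (alternative).

-- ===== PORT A =====
-- one loop step of A: move / turn, then update the four running extrema
-- (tuple index NEXT_X[direction] ported with pyGetD; direction is always 0..3, so Python never raises here)
def stepA (st : Int × Int × Int × Int × Int × Int × Int) (c : Char) :
    Int × Int × Int × Int × Int × Int × Int :=
  let (x, y, dir, maxx, minx, maxy, miny) := st
  let m :=
    if c == 'F' then
      (x + PySem.List.pyGetD [0, -1, 0, 1] dir 0, y + PySem.List.pyGetD [1, 0, -1, 0] dir 0, dir)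
    else if c == 'B' then
      (x - PySem.List.pyGetD [0, -1, 0, 1] dir 0, y - PySem.List.pyGetD [1, 0, -1, 0] dir 0, dir)
    else if c == 'L' then (x, y, PySem.Int.mod (dir + 1) 4)
    else (x, y, PySem.Int.mod (dir + 3) 4)
  (m.1, m.2.1, m.2.2, max maxx m.1, min minx m.1, max maxy m.2.1, min miny m.2.1)

def solution (commands : String) : Int :=
  let st := commands.toList.foldl stepA (0, 0, 0, 0, 0, 0, 0)
  (st.2.2.2.1 - st.2.2.2.2.1) * (st.2.2.2.2.2.1 - st.2.2.2.2.2.2)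

-- ===== PORT B =====
-- VEC[d] from Source B (index is t % 4, always 0..3)
def vec (d : Int) : Int × Int :=
  PySem.List.pyGetD [((0 : Int), (1 : Int)), (-1, 0), (0, -1), (1, 0)] d (0, 0)

-- pass 1 of Source B: signed turn counter, list of displacements
def stepT (st : Int × List (Int × Int)) (c : Char) : Int × List (Int × Int) :=
  let (t, ds) := st
  if c == 'L' then (t + 1, ds ++ [(0, 0)])
  else if c == 'F' then (t, ds ++ [vec (PySem.Int.mod t 4)])
  else if c == 'B' then
    let p := vec (PySem.Int.mod t 4)
    (t, ds ++ [(-p.1, -p.2)])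
  else (t - 1, ds ++ [(0, 0)])

-- pass 2 of Source B: prefix sums into the coordinate lists
def stepP (st : Int × Int × List Int × List Int) (d : Int × Int) :
    Int × Int × List Int × List Int :=
  let (x, y, xs, ys) := st
  (x + d.1, y + d.2, xs ++ [x + d.1], ys ++ [y + d.2])

def solution_alt (commands : String) : Int :=
  let deltas := (commands.toList.foldl stepT (0, [])).2
  let p := deltas.foldl stepP (0, 0, [(0 : Int)], [(0 : Int)])
  let xs := p.2.2.1
  let ys := p.2.2.2
  ((PySem.List.max? xs (fun v => v)).getD 0 - (PySem.List.min? xs (fun v => v)).getD 0) *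
    ((PySem.List.max? ys (fun v => v)).getD 0 - (PySem.List.min? ys (fun v => v)).getD 0)

-- ===== PRECONDITION & SPEC =====
def Spec_solution (commands : String) (out : Int) : Prop := out = solution_alt commands
instance (commands : String) (out : Int) : Decidable (Spec_solution commands out) := by unfold Spec_solution; infer_instance

-- ===== CLAIM =====
def Claim_equal_solution : Prop := ∀ (commands : String), Dom_solution commands → Spec_solution commands (solution commands)

-- ===== LEMMAS AND PROOFS =====

lemma mod4_cases (t : Int) :
    PySem.Int.mod t 4 = 0 ∨ PySem.Int.mod t 4 = 1 ∨ PySem.Int.mod t 4 = 2 ∨ PySem.Int.mod t 4 = 3 := by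
  rw [PySem.Int.mod_eq_emod_of_pos (by norm_num)]
  omega

lemma mod4_shift (t k : Int) :
    PySem.Int.mod (PySem.Int.mod t 4 + k) 4 = PySem.Int.mod (t + k) 4 := by
  rw [PySem.Int.mod_eq_emod_of_pos (by norm_num), PySem.Int.mod_eq_emod_of_pos (by norm_num),
    PySem.Int.mod_eq_emod_of_pos (by norm_num), Int.add_emod, Int.emod_emod_of_dvd,
    ← Int.add_emod] <;> norm_num

-- the two component lookups of A equal the components of B's pair lookup, at m = t % 4
lemma vec_comp (t : Int) :
    (vec (PySem.Int.mod t 4)).1 = PySem.List.pyGetD [0, -1, 0, 1] (PySem.Int.mod t 4) 0 ∧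
    (vec (PySem.Int.mod t 4)).2 = PySem.List.pyGetD [1, 0, -1, 0] (PySem.Int.mod t 4) 0 := by
  rcases mod4_cases t with h | h | h | h <;> rw [h] <;> exact ⟨by decide, by decide⟩

-- branch evaluations of the two step functions
lemma stepA_F (x y d Mx mx My my : Int) :
    stepA (x, y, d, Mx, mx, My, my) 'F' =
      (x + PySem.List.pyGetD [0, -1, 0, 1] d 0, y + PySem.List.pyGetD [1, 0, -1, 0] d 0, d,
       max Mx (x + PySem.List.pyGetD [0, -1, 0, 1] d 0), min mx (x + PySem.List.pyGetD [0, -1, 0, 1] d 0),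
       max My (y + PySem.List.pyGetD [1, 0, -1, 0] d 0), min my (y + PySem.List.pyGetD [1, 0, -1, 0] d 0)) := rfl

lemma stepA_B (x y d Mx mx My my : Int) :
    stepA (x, y, d, Mx, mx, My, my) 'B' =
      (x - PySem.List.pyGetD [0, -1, 0, 1] d 0, y - PySem.List.pyGetD [1, 0, -1, 0] d 0, d,
       max Mx (x - PySem.List.pyGetD [0, -1, 0, 1] d 0), min mx (x - PySem.List.pyGetD [0, -1, 0, 1] d 0),
       max My (y - PySem.List.pyGetD [1, 0, -1, 0] d 0), min my (y - PySem.List.pyGetD [1, 0, -1, 0] d 0)) := rfl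

lemma stepA_L (x y d Mx mx My my : Int) :
    stepA (x, y, d, Mx, mx, My, my) 'L' =
      (x, y, PySem.Int.mod (d + 1) 4, max Mx x, min mx x, max My y, min my y) := rfl

lemma stepA_R (x y d Mx mx My my : Int) (c : Char) (hF : c ≠ 'F') (hB : c ≠ 'B') (hL : c ≠ 'L') :
    stepA (x, y, d, Mx, mx, My, my) c =
      (x, y, PySem.Int.mod (d + 3) 4, max Mx x, min mx x, max My y, min my y) := by
  simp [stepA, hF, hB, hL]

lemma stepT_F (t : Int) (ds : List (Int × Int)) :
    stepT (t, ds) 'F' = (t, ds ++ [vec (PySem.Int.mod t 4)]) := rfl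

lemma stepT_B (t : Int) (ds : List (Int × Int)) :
    stepT (t, ds) 'B' = (t, ds ++ [(-(vec (PySem.Int.mod t 4)).1, -(vec (PySem.Int.mod t 4)).2)]) := rfl

lemma stepT_L (t : Int) (ds : List (Int × Int)) :
    stepT (t, ds) 'L' = (t + 1, ds ++ [(0, 0)]) := rfl

lemma stepT_R (t : Int) (ds : List (Int × Int)) (c : Char) (hF : c ≠ 'F') (hB : c ≠ 'B') (hL : c ≠ 'L') :
    stepT (t, ds) c = (t - 1, ds ++ [(0, 0)]) := by
  simp [stepT, hF, hB, hL]

-- pass 1's delta list is the seed followed by a seed-independent suffix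
lemma T_acc : ∀ (cs : List Char) (t : Int) (ds : List (Int × Int)),
    cs.foldl stepT (t, ds) =
      ((cs.foldl stepT (t, [])).1, ds ++ (cs.foldl stepT (t, [])).2)
  | [], t, ds => by simp
  | c :: cs, t, ds => by
      simp only [List.foldl_cons, stepT]
      split_ifs <;>
        · simp only [List.nil_append]
          rw [T_acc cs _ (ds ++ _), T_acc cs _ ([_])]
          simp

-- one extrema-updating step over a displacement (the fold A effectively performs over deltas)
def stepE (st : Int × Int × Int × Int × Int × Int) (d : Int × Int) :
    Int × Int × Int × Int × Int × Int :=
  let (x, y, Mx, mx, My, my) := st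
  (x + d.1, y + d.2, max Mx (x + d.1), min mx (x + d.1), max My (y + d.2), min my (y + d.2))

-- main invariant: A's fold equals the extrema fold over pass 1's deltas, with the direction
-- carried as the signed counter mod 4
lemma main_inv : ∀ (cs : List Char) (t x y Mx mx My my : Int),
    cs.foldl stepA (x, y, PySem.Int.mod t 4, Mx, mx, My, my) =
      (let e := (cs.foldl stepT (t, [])).2.foldl stepE (x, y, Mx, mx, My, my)
       (e.1, e.2.1, PySem.Int.mod (cs.foldl stepT (t, [])).1 4,
        e.2.2.1, e.2.2.2.1, e.2.2.2.2.1, e.2.2.2.2.2))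
  | [], t, x, y, Mx, mx, My, my => by simp
  | c :: cs, t, x, y, Mx, mx, My, my => by
      obtain ⟨h1, h2⟩ := vec_comp t
      rw [show PySem.Int.mod t 4 = t % 4 from PySem.Int.mod_eq_emod_of_pos (by norm_num)] at h1 h2
      simp only [List.foldl_cons]
      by_cases hF : c = 'F'
      · subst hF
        rw [stepA_F, stepT_F, main_inv cs t]
        simp only [List.nil_append]
        rw [T_acc cs t [vec (PySem.Int.mod t 4)]]
        simp [stepE, h1, h2]
      by_cases hB : c = 'B'
      · subst hB
        rw [stepA_B, stepT_B, main_inv cs t]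
        simp only [List.nil_append]
        rw [T_acc cs t [(-(vec (PySem.Int.mod t 4)).1, -(vec (PySem.Int.mod t 4)).2)]]
        simp [stepE, h1, h2, sub_eq_add_neg]
      by_cases hL : c = 'L'
      · subst hL
        rw [stepA_L, stepT_L, mod4_shift t 1, main_inv cs (t + 1)]
        simp only [List.nil_append]
        rw [T_acc cs (t + 1) [(0, 0)]]
        simp [stepE]
      · rw [stepA_R x y _ Mx mx My my c hF hB hL, stepT_R t [] c hF hB hL, mod4_shift t 3,
          show t + 3 = (t - 1) + 4 by ring,
          show PySem.Int.mod (t - 1 + 4) 4 = PySem.Int.mod (t - 1) 4 by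
            rw [PySem.Int.mod_eq_emod_of_pos (by norm_num),
              PySem.Int.mod_eq_emod_of_pos (by norm_num)]; omega,
          main_inv cs (t - 1)]
        simp only [List.nil_append]
        rw [T_acc cs (t - 1) [(0, 0)]]
        simp [stepE]

-- pass 2's coordinate lists are seed-independent suffixes
lemma P_acc : ∀ (ds : List (Int × Int)) (x y : Int) (xs ys : List Int),
    ds.foldl stepP (x, y, xs, ys) =
      ((ds.foldl stepP (x, y, [], [])).1, (ds.foldl stepP (x, y, [], [])).2.1,
       xs ++ (ds.foldl stepP (x, y, [], [])).2.2.1,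
       ys ++ (ds.foldl stepP (x, y, [], [])).2.2.2)
  | [], x, y, xs, ys => by simp
  | d :: ds, x, y, xs, ys => by
      simp only [List.foldl_cons, stepP, List.nil_append]
      rw [P_acc ds _ _ (xs ++ _) (ys ++ _), P_acc ds _ _ ([_]) ([_])]
      simp

-- the extrema fold is the max/min reduction of pass 2's coordinate suffixes
lemma E_eq_P : ∀ (ds : List (Int × Int)) (x y Mx mx My my : Int),
    ds.foldl stepE (x, y, Mx, mx, My, my) =
      ((ds.foldl stepP (x, y, [], [])).1, (ds.foldl stepP (x, y, [], [])).2.1,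
       (ds.foldl stepP (x, y, [], [])).2.2.1.foldl max Mx,
       (ds.foldl stepP (x, y, [], [])).2.2.1.foldl min mx,
       (ds.foldl stepP (x, y, [], [])).2.2.2.foldl max My,
       (ds.foldl stepP (x, y, [], [])).2.2.2.foldl min my)
  | [], x, y, Mx, mx, My, my => by simp
  | d :: ds, x, y, Mx, mx, My, my => by
      simp only [List.foldl_cons, stepE, stepP, List.nil_append]
      rw [E_eq_P ds, P_acc ds _ _ ([x + d.1]) ([y + d.2])]
      simp

-- ===== VERDICT =====
theorem solution_spec : Claim_equal_solution := by
  intro commands _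
  simp only [Spec_solution, solution, solution_alt]
  conv_lhs => rw [show ((0 : Int), (0 : Int), (0 : Int), (0 : Int), (0 : Int), (0 : Int), (0 : Int)) =
    ((0 : Int), (0 : Int), PySem.Int.mod 0 4, (0 : Int), (0 : Int), (0 : Int), (0 : Int)) from by decide]
  rw [main_inv, E_eq_P]
  rw [P_acc _ 0 0 [(0 : Int)] [(0 : Int)]]
  simp [PySem.List.max?_id_cons, PySem.List.min?_id_cons]
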